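-- pv_equiv track=rewrite | github.com/pushpa-info-14/python-programming | LeetCode/3750-4000/Q3904 Smallest Stable Index II.py | firstStableIndex
-- ===== SOURCE A (Python) =====
-- def firstStableIndex(nums: list[int], k: int) -> int:
--     n = len(nums)
--     prev_greater = [-1] * n
--     next_smaller = [-1] * n
--     cur = nums[0]
--     for i in range(n):
--         cur = max(cur, nums[i])
--         prev_greater[i] = cur
--     cur = nums[-1]
--     for i in range(n - 1, -1, -1):
--         cur = min(cur, nums[i])
--         next_smaller[i] = cur
--
--     res = -1
--     for i in range(n):
--         maxi = max(nums[i], prev_greater[i])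
--         mini = min(nums[i], next_smaller[i])
--         if (maxi - mini) <= k:
--             res = i
--             break
--     return res
-- ===== SOURCE B (Python) =====
-- def firstStableIndex(nums: list[int], k: int) -> int:
--     # Divide and conquer: rec(lo, hi, left_max, right_min) returns the first
--     # stable index in [lo, hi) given the max of everything left of lo (folded
--     # with nums[0]) and the min of everything right of hi (folded with
--     # nums[-1]); no prefix/suffix arrays are built, depth is O(log n).
--     def rec(lo, hi, left_max, right_min):
--         if hi - lo == 1:
--             hi_v = max(left_max, nums[lo])
--             lo_v = min(right_min, nums[lo])
--             return lo if hi_v - lo_v <= k else -1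
--         mid = (lo + hi) // 2
--         ans = rec(lo, mid, left_max, min(right_min, min(nums[mid:hi])))
--         if ans != -1:
--             return ans
--         return rec(mid, hi, max(left_max, max(nums[lo:mid])), right_min)
--     return rec(0, len(nums), nums[0], nums[-1])
-- ===== Notes on version B (the rewrite author's own statement) =====
-- stated objective: alternative
-- what changed: B replaces A's three linear passes and two auxiliary arrays (prev_greater, next_smaller) by a divide-and-conquer recursion that splits the array at the midpoint, carrying the max of everything to the left and the min of everything to the right as context arguments, and checks each leaf index directly; no prefix/suffix arrays are built.
import Mathlib
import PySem

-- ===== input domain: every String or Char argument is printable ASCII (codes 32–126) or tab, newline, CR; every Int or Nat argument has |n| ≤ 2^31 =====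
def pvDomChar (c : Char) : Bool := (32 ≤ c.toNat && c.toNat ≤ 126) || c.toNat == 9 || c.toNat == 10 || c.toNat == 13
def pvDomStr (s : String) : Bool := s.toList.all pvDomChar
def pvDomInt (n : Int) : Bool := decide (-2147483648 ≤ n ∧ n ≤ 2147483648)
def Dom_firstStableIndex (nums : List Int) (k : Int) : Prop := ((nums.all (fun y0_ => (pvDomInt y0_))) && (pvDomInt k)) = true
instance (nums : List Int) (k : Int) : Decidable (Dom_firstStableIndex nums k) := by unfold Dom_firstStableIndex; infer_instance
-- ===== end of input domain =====

-- B replaces A's three linear passes and two auxiliary arrays by a divide-and-conquer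
-- recursion that splits at the midpoint, carrying the max of everything to the left and
-- the min of everything to the right as context; no prefix/suffix arrays are built.

-- ===== PORT A =====
-- A's third loop ('for i in range(n): … break') as structural recursion over the range list
def fsiFind (nums pg ns : List Int) (k : Int) : List Int → Int
  | [] => -1
  | i :: rest =>
    let maxi := max (PySem.List.pyGetD nums i 0) (PySem.List.pyGetD pg i 0)
    let mini := min (PySem.List.pyGetD nums i 0) (PySem.List.pyGetD ns i 0)
    if maxi - mini ≤ k then i else fsiFind nums pg ns k rest

def firstStableIndex (nums : List Int) (k : Int) : Int :=
  let n : Int := PySem.List.len nums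
  let prev0 : List Int := PySem.List.pyRepeat [(-1 : Int)] n
  let next0 : List Int := PySem.List.pyRepeat [(-1 : Int)] n
  let pg := (PySem.List.pyRange 0 n 1).foldl
    (fun (st : Int × List Int) i =>
      let cur := max st.1 (PySem.List.pyGetD nums i 0)
      (cur, PySem.List.pySetD st.2 i cur)) (PySem.List.pyGetD nums 0 0, prev0)
  let ns := (PySem.List.pyRange (n - 1) (-1) (-1)).foldl
    (fun (st : Int × List Int) i =>
      let cur := min st.1 (PySem.List.pyGetD nums i 0)
      (cur, PySem.List.pySetD st.2 i cur)) (PySem.List.pyGetD nums (-1) 0, next0)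
  fsiFind nums pg.2 ns.2 k (PySem.List.pyRange 0 n 1)

-- ===== PORT B =====
-- Source B's inner rec(lo, hi, left_max, right_min); the 'hi ≤ lo → -1' arm is only a
-- totality guard, never reached from the top-level call (Python never reaches it either).
-- fuel (≥ hi - lo at every call) is only a structural-termination device, never exhausted
def fsiRec (nums : List Int) (k : Int) : Nat → Nat → Nat → Int → Int → Int
  | 0, _, _, _, _ => -1
  | fuel + 1, lo, hi, leftMax, rightMin =>
    if hi - lo = 1 then
      let hiV := max leftMax (PySem.List.pyGetD nums (lo : Int) 0)
      let loV := min rightMin (PySem.List.pyGetD nums (lo : Int) 0)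
      if hiV - loV ≤ k then (lo : Int) else -1
    else if hi ≤ lo then -1
    else
      let mid := (lo + hi) / 2
      let ans := fsiRec nums k fuel lo mid leftMax
        (min rightMin ((PySem.List.min? (PySem.List.slice nums (some (mid : Int)) (some (hi : Int))) (fun y => y)).getD 0))
      if ans ≠ -1 then ans
      else fsiRec nums k fuel mid hi
        (max leftMax ((PySem.List.max? (PySem.List.slice nums (some (lo : Int)) (some (mid : Int))) (fun y => y)).getD 0))
        rightMin

def firstStableIndex_alt (nums : List Int) (k : Int) : Int :=
  fsiRec nums k nums.length 0 nums.length (PySem.List.pyGetD nums 0 0) (PySem.List.pyGetD nums (-1) 0)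

-- ===== PRECONDITION & SPEC =====
-- Pre_ excludes only the empty list, on which A raises IndexError at nums[0].
def Pre_firstStableIndex (nums : List Int) (k : Int) : Prop := nums ≠ []
instance (nums : List Int) (k : Int) : Decidable (Pre_firstStableIndex nums k) := by
  unfold Pre_firstStableIndex; infer_instance
def pvWitness_firstStableIndex : List Int × Int := ([3, 1, 2], 1)

def Spec_firstStableIndex (nums : List Int) (k : Int) (out : Int) : Prop := out = firstStableIndex_alt nums k
instance (nums : List Int) (k : Int) (out : Int) : Decidable (Spec_firstStableIndex nums k out) := by unfold Spec_firstStableIndex; infer_instance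

-- ===== CLAIM (what is proved, stated in full; the proofs are below) =====
def Claim_equal_firstStableIndex : Prop := ∀ (nums : List Int) (k : Int), Dom_firstStableIndex nums k → Pre_firstStableIndex nums k → Spec_firstStableIndex nums k (firstStableIndex nums k)

-- ===== LEMMAS AND PROOFS =====

-- prefix-max scan list: pgScan c l : i-th element = max of c and l[0..i]
def pgScan : Int → List Int → List Int
  | _, [] => []
  | c, x :: t => (max c x) :: pgScan (max c x) t

-- suffix-min list for nums[0..m-1] seeded with c: i-th element = min of c and nums[i..m-1]
def smL (nums : List Int) : Nat → Int → List Int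
  | 0, _ => []
  | m + 1, c => smL nums m (min c (nums.getD m 0)) ++ [min c (nums.getD m 0)]

-- option-to-result: first found index, else the carried res
def optR : Option Nat → Int → Int
  | some i, _ => (i : Int)
  | none, r => r

theorem foldl_min_comm (l : List Int) (a b : Int) :
    l.foldl min (min a b) = min (l.foldl min a) b := by
  induction l generalizing a with
  | nil => rfl
  | cons h t ih =>
    simp only [List.foldl_cons]
    rw [show min (min a b) h = min (min a h) b by omega, ih]

theorem foldl_max_comm (l : List Int) (a b : Int) :
    l.foldl max (max a b) = max (l.foldl max a) b := by
  induction l generalizing a with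
  | nil => rfl
  | cons h t ih =>
    simp only [List.foldl_cons]
    rw [show max (max a b) h = max (max a h) b by omega, ih]

theorem foldl_min_swap (s t : List Int) (c : Int) :
    t.foldl min (s.foldl min c) = s.foldl min (t.foldl min c) := by
  induction s generalizing c with
  | nil => rfl
  | cons x s' ih =>
    simp only [List.foldl_cons]
    rw [ih (min c x), foldl_min_comm t c x]

theorem find?_congr_mem {α : Type} (l : List α) (p q : α → Bool)
    (h : ∀ x ∈ l, p x = q x) : l.find? p = l.find? q := by
  induction l with
  | nil => rfl
  | cons x t ih =>
    simp only [List.find?]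
    rw [h x (List.mem_cons_self)]
    cases q x
    · exact ih fun y hy => h y (List.mem_cons_of_mem _ hy)
    · rfl

theorem take_set_succ (arr : List Int) (a : Nat) (v : Int) (h : a < arr.length) :
    (arr.set a v).take (a+1) = arr.take a ++ [v] := by
  rw [List.set_eq_take_cons_drop v h, List.take_append]
  simp [List.length_take, Nat.min_eq_left (Nat.le_of_lt h)]

theorem drop_set_self (arr : List Int) (a : Nat) (v : Int) (h : a < arr.length) :
    (arr.set a v).drop a = v :: arr.drop (a+1) := by
  rw [List.set_eq_take_cons_drop v h]
  rw [List.drop_append_of_le_length (by simp [List.length_take]; omega)]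
  simp

theorem getD_append_left (l1 l2 : List Int) (i : Nat) (d : Int) (h : i < l1.length) :
    (l1 ++ l2).getD i d = l1.getD i d := by
  simp [List.getD, List.getElem?_append_left h]

theorem length_smL (nums : List Int) (m : Nat) (c : Int) : (smL nums m c).length = m := by
  induction m generalizing c with
  | zero => rfl
  | succ m ih => simp [smL, ih]

theorem getD_pgScan (l : List Int) (c : Int) (i : Nat) (h : i < l.length) :
    (pgScan c l).getD i 0 = (l.take (i+1)).foldl max c := by
  induction l generalizing c i with
  | nil => simp at h
  | cons x t ih =>
    cases i with
    | zero => simp [pgScan, List.getD]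
    | succ i =>
      simp only [pgScan, List.getD, List.getElem?_cons_succ, List.take_succ_cons,
        List.foldl_cons]
      exact ih (max c x) i (by simpa using h)

theorem getD_smL (nums : List Int) (m : Nat) (c : Int) (i : Nat)
    (hm : m ≤ nums.length) (hi : i < m) :
    (smL nums m c).getD i 0 = ((nums.take m).drop i).foldl min c := by
  induction m generalizing c with
  | zero => omega
  | succ m ih =>
    have hmn : m < nums.length := by omega
    have hx : nums.getD m 0 = nums[m] := by simp [List.getD, List.getElem?_eq_getElem hmn]
    have htake : nums.take (m+1) = nums.take m ++ [nums[m]] := by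
      rw [List.take_add_one]
      simp [List.getElem?_eq_getElem hmn]
    by_cases him : i = m
    · subst him
      have h1 : (smL nums (i+1) c).getD i 0 = min c (nums.getD i 0) := by
        rw [show smL nums (i+1) c
            = smL nums i (min c (nums.getD i 0)) ++ [min c (nums.getD i 0)] from rfl]
        simp [List.getD, length_smL]
      rw [h1, htake, hx]
      rw [List.drop_append_of_le_length (by simp [List.length_take]; omega)]
      simp
    · have hi' : i < m := by omega
      have h1 : (smL nums (m+1) c).getD i 0 =
          (smL nums m (min c (nums.getD m 0))).getD i 0 :=
        getD_append_left (smL nums m (min c (nums.getD m 0))) [min c (nums.getD m 0)] i 0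
          (by rw [length_smL]; exact hi')
      rw [h1, ih (min c (nums.getD m 0)) (by omega) hi']
      rw [htake, List.drop_append_of_le_length (by simp [List.length_take]; omega)]
      rw [List.foldl_append, hx]
      simp only [List.foldl_cons, List.foldl_nil]
      rw [foldl_min_comm]

-- A's first loop: filling prev_greater in place is the prefix-max scan
theorem fwd_fill (nums : List Int) (d : List Int) :
    ∀ (a : Nat), nums.drop a = d → ∀ (cur : Int) (arr : List Int), arr.length = nums.length →
    ((PySem.List.pyRange (a : Int) (nums.length : Int) 1).foldl
      (fun (st : Int × List Int) i =>
        let c := max st.1 (PySem.List.pyGetD nums i 0)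
        (c, PySem.List.pySetD st.2 i c)) (cur, arr)).2
      = arr.take a ++ pgScan cur d := by
  induction d with
  | nil =>
    intro a hd cur arr harr
    have : nums.length ≤ a := by
      have := congrArg List.length hd; simp at this; omega
    rw [PySem.List.pyRange_one_eq_nil (by exact_mod_cast this)]
    have hle : arr.length ≤ a := by omega
    simp [pgScan, List.take_of_length_le hle]
  | cons x t ih =>
    intro a hd cur arr harr
    have ha : a < nums.length := by
      by_contra hcon
      rw [List.drop_of_length_le (by omega)] at hd
      exact absurd hd.symm (List.cons_ne_nil x t)
    have hca : nums[a] :: nums.drop (a+1) = x :: t := by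
      rw [← List.drop_eq_getElem_cons ha, hd]
    have hx : nums[a] = x := ((List.cons.injEq ..).mp hca).1
    rw [PySem.List.pyRange_one_cons (by exact_mod_cast ha)]
    simp only [List.foldl_cons]
    have hget : PySem.List.pyGetD nums (a : Int) 0 = x := by
      simp [PySem.List.pyGetD_natCast, List.getD, List.getElem?_eq_getElem ha, hx]
    have hset : PySem.List.pySetD arr (a : Int) (max cur x) = arr.set a (max cur x) := by
      simp [PySem.List.pySetD_natCast]
    have hd' : nums.drop (a+1) = t := ((List.cons.injEq ..).mp hca).2
    have := ih (a+1) hd' (max cur x) (arr.set a (max cur x)) (by simp [harr])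
    push_cast at this
    rw [hget, hset, this, take_set_succ arr a (max cur x) (by omega)]
    simp [pgScan]

-- A's second loop: filling next_smaller downwards is the suffix-min list
theorem bwd_fill (nums : List Int) :
    ∀ (m : Nat), m ≤ nums.length → ∀ (cur : Int) (arr : List Int), arr.length = nums.length →
    ((PySem.List.pyRange ((m : Int) - 1) (-1) (-1)).foldl
      (fun (st : Int × List Int) i =>
        let c := min st.1 (PySem.List.pyGetD nums i 0)
        (c, PySem.List.pySetD st.2 i c)) (cur, arr)).2
      = smL nums m cur ++ arr.drop m := by
  intro m
  induction m with
  | zero =>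
    intro _ cur arr harr
    rw [show ((0 : Nat) : Int) - 1 = -1 by norm_num, PySem.List.pyRange_neg_one_eq_nil le_rfl]
    simp [smL]
  | succ m ih =>
    intro hm cur arr harr
    have hmn : m < nums.length := by omega
    rw [show ((m+1 : Nat) : Int) - 1 = (m : Int) by push_cast; ring]
    rw [PySem.List.pyRange_neg_one_cons (by omega)]
    simp only [List.foldl_cons]
    have hget : PySem.List.pyGetD nums (m : Int) 0 = nums.getD m 0 := by
      simp [PySem.List.pyGetD_natCast]
    have hset : PySem.List.pySetD arr (m : Int) (min cur (nums.getD m 0))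
        = arr.set m (min cur (nums.getD m 0)) := by simp [PySem.List.pySetD_natCast]
    have := ih (by omega) (min cur (nums.getD m 0))
      (arr.set m (min cur (nums.getD m 0))) (by simp [harr])
    rw [show (m : Int) - 1 = ((m : Nat) : Int) - 1 by norm_num] at this
    rw [hget, hset, this, drop_set_self arr m _ (by omega)]
    simp [smL]

-- A's third loop is find? over the range list
theorem fsiFind_eq_find? (nums pg ns : List Int) (k : Int) (l : List Int) :
    fsiFind nums pg ns k l =
      (match l.find? (fun i => decide (max (PySem.List.pyGetD nums i 0) (PySem.List.pyGetD pg i 0)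
          - min (PySem.List.pyGetD nums i 0) (PySem.List.pyGetD ns i 0) ≤ k)) with
        | some i => i
        | none => -1) := by
  induction l with
  | nil => rfl
  | cons i rest ih =>
    simp only [fsiFind, List.find?]
    by_cases h : max (PySem.List.pyGetD nums i 0) (PySem.List.pyGetD pg i 0)
        - min (PySem.List.pyGetD nums i 0) (PySem.List.pyGetD ns i 0) ≤ k
    · simp [h]
    · simp [h, ih]

-- the common specification predicate: index i is stable
def stableP (nums : List Int) (k c0 cL : Int) (i : Nat) : Bool :=
  decide ((nums.take (i+1)).foldl max c0 - (nums.drop i).foldl min cL ≤ k)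

-- B's recursion returns the first index of [lo, hi) satisfying stableP, else -1
theorem fsiRec_correct (nums : List Int) (k c0 cL : Int) :
    ∀ (fuel lo hi : Nat), hi - lo ≤ fuel → lo < hi → hi ≤ nums.length →
    fsiRec nums k fuel lo hi ((nums.take lo).foldl max c0) ((nums.drop hi).foldl min cL)
      = optR ((List.range' lo (hi - lo)).find? (stableP nums k c0 cL)) (-1) := by
  intro fuel
  induction fuel with
  | zero => intro lo hi hd hlh hhn; omega
  | succ fuel IH =>
    intro lo hi hd hlh hhn
    by_cases hleaf : hi - lo = 1
    · -- leaf: hi = lo + 1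
      have hhi : hi = lo + 1 := by omega
      subst hhi
      have hlo : lo < nums.length := by omega
      have hget : PySem.List.pyGetD nums (lo : Int) 0 = nums[lo] := by
        simp [PySem.List.pyGetD_natCast, List.getD, List.getElem?_eq_getElem hlo]
      have hpm : (nums.take (lo+1)).foldl max c0
          = max ((nums.take lo).foldl max c0) nums[lo] := by
        have ht : nums.take (lo+1) = nums.take lo ++ [nums[lo]] := by
          rw [List.take_add_one]
          simp [List.getElem?_eq_getElem hlo]
        rw [ht, List.foldl_append]
        simp
      have hsm : (nums.drop lo).foldl min cL
          = min ((nums.drop (lo+1)).foldl min cL) nums[lo] := by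
        rw [List.drop_eq_getElem_cons hlo]
        simp only [List.foldl_cons]
        rw [foldl_min_comm]
      rw [fsiRec, if_pos hleaf]
      simp only [hget, ← hpm, ← hsm]
      rw [show lo + 1 - lo = 1 by omega]
      by_cases h : (nums.take (lo+1)).foldl max c0 - (nums.drop lo).foldl min cL ≤ k
      · rw [if_pos h]
        simp [List.range', stableP, h, optR]
      · rw [if_neg h]
        simp [List.range', stableP, h, optR]
    · -- split at mid
      have hlo2 : lo + 2 ≤ hi := by omega
      rw [fsiRec, if_neg hleaf, if_neg (by omega : ¬ hi ≤ lo)]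
      have hlm : lo < (lo + hi) / 2 := by omega
      have hmh : (lo + hi) / 2 < hi := by omega
      set mid := (lo + hi) / 2 with hmid
      have hs1 : PySem.List.slice nums (some ((mid : Nat) : Int)) (some ((hi : Nat) : Int))
          = (nums.drop mid).take (hi - mid) := PySem.List.slice_natCast ..
      have hs2 : PySem.List.slice nums (some ((lo : Nat) : Int)) (some ((mid : Nat) : Int))
          = (nums.drop lo).take (mid - lo) := PySem.List.slice_natCast ..
      obtain ⟨x1, t1, hseg1⟩ : ∃ x t, (nums.drop mid).take (hi - mid) = x :: t := by
        cases hc : (nums.drop mid).take (hi - mid) with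
        | nil =>
          exfalso
          have := congrArg List.length hc
          simp [List.length_take, List.length_drop] at this
          omega
        | cons a b => exact ⟨a, b, rfl⟩
      obtain ⟨x2, t2, hseg2⟩ : ∃ x t, (nums.drop lo).take (mid - lo) = x :: t := by
        cases hc : (nums.drop lo).take (mid - lo) with
        | nil =>
          exfalso
          have := congrArg List.length hc
          simp [List.length_take, List.length_drop] at this
          omega
        | cons a b => exact ⟨a, b, rfl⟩
      -- the right-min argument passed to the left call is the suffix min from mid
      have hsplit1 : (nums.drop mid).take (hi - mid) ++ nums.drop hi = nums.drop mid := by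
        conv_rhs => rw [← List.take_append_drop (hi - mid) (nums.drop mid)]
        rw [List.drop_drop, show mid + (hi - mid) = hi from by omega]
      have hRm : min ((nums.drop hi).foldl min cL) (t1.foldl min x1)
          = (nums.drop mid).foldl min cL := by
        have e1 : ((x1 :: t1).foldl min ((nums.drop hi).foldl min cL))
            = min ((nums.drop hi).foldl min cL) (t1.foldl min x1) := by
          simp only [List.foldl_cons]
          rw [min_comm ((nums.drop hi).foldl min cL) x1, foldl_min_comm,
            min_comm (t1.foldl min x1)]
        rw [← e1, ← hseg1, foldl_min_swap, ← List.foldl_append, hsplit1]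
      -- the left-max argument passed to the right call is the prefix max up to mid
      have hsplit2 : nums.take lo ++ (nums.drop lo).take (mid - lo) = nums.take mid := by
        rw [← List.take_add, show lo + (mid - lo) = mid by omega]
      have hLm : max ((nums.take lo).foldl max c0) (t2.foldl max x2)
          = (nums.take mid).foldl max c0 := by
        have e2 : ((x2 :: t2).foldl max ((nums.take lo).foldl max c0))
            = max ((nums.take lo).foldl max c0) (t2.foldl max x2) := by
          simp only [List.foldl_cons]
          rw [max_comm ((nums.take lo).foldl max c0) x2, foldl_max_comm,
            max_comm (t2.foldl max x2)]
        rw [← e2, ← hseg2, ← List.foldl_append, hsplit2]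
      have IH1 := IH lo mid (by omega) hlm (by omega)
      have IH2 := IH mid hi (by omega) hmh hhn
      simp only [hs1, hs2, hseg1, hseg2, PySem.List.min?_id_cons, PySem.List.max?_id_cons,
        Option.getD_some, hRm, hLm, IH1, IH2]
      have hr : List.range' lo (hi - lo)
          = List.range' lo (mid - lo) ++ List.range' mid (hi - mid) := by
        have h0 := @List.range'_append lo (mid - lo) (hi - mid) 1
        rw [show lo + 1 * (mid - lo) = mid from by omega,
          show (mid - lo) + (hi - mid) = hi - lo from by omega] at h0
        exact h0.symm
      rw [hr, List.find?_append]
      cases hF : (List.range' lo (mid - lo)).find? (stableP nums k c0 cL) with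
      | none => simp [optR]
      | some i =>
        have : ((i : Nat) : Int) ≠ -1 := by omega
        simp [optR, Option.or, this]

theorem firstStableIndex_main (nums : List Int) (k : Int) (hne : nums ≠ []) :
    firstStableIndex nums k = firstStableIndex_alt nums k := by
  have hn : 0 < nums.length := List.length_pos_of_ne_nil hne
  have hrep : PySem.List.pyRepeat [(-1 : Int)] ((nums.length : Int))
      = List.replicate nums.length (-1) := by
    rw [PySem.List.pyRepeat_singleton]; simp
  -- A side
  have h1 := fwd_fill nums nums 0 (by simp) (PySem.List.pyGetD nums 0 0)
    (List.replicate nums.length (-1)) (by simp)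
  have h2 := bwd_fill nums nums.length le_rfl (PySem.List.pyGetD nums (-1) 0)
    (List.replicate nums.length (-1)) (by simp)
  push_cast at h1
  simp only [List.take_zero, List.nil_append] at h1
  have hdrop2 : (List.replicate nums.length ((-1) : Int)).drop nums.length = [] := by simp
  rw [hdrop2, List.append_nil] at h2
  have hA : firstStableIndex nums k =
      (match (PySem.List.pyRange 0 (nums.length : Int) 1).find?
          (fun i => decide (max (PySem.List.pyGetD nums i 0)
              (PySem.List.pyGetD (pgScan (PySem.List.pyGetD nums 0 0) nums) i 0)
            - min (PySem.List.pyGetD nums i 0)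
              (PySem.List.pyGetD (smL nums nums.length (PySem.List.pyGetD nums (-1) 0)) i 0) ≤ k)) with
        | some i => i
        | none => -1) := by
    unfold firstStableIndex
    simp only [PySem.List.len_eq]
    rw [hrep, h1, h2, fsiFind_eq_find?]
  -- B side via fsiRec_correct
  have hB := fsiRec_correct nums k (PySem.List.pyGetD nums 0 0) (PySem.List.pyGetD nums (-1) 0)
    nums.length 0 nums.length (by omega) hn le_rfl
  simp only [List.take_zero, List.foldl_nil, List.drop_length, Nat.sub_zero] at hB
  have hB' : firstStableIndex_alt nums k
      = optR ((List.range' 0 nums.length).find?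
          (stableP nums k (PySem.List.pyGetD nums 0 0) (PySem.List.pyGetD nums (-1) 0))) (-1) := by
    unfold firstStableIndex_alt
    exact hB
  -- align the two predicates on the common index range
  rw [hA, hB']
  rw [PySem.List.pyRange_zero_natCast, List.find?_map]
  have hcong : (List.range nums.length).find?
      ((fun i => decide (max (PySem.List.pyGetD nums i 0)
          (PySem.List.pyGetD (pgScan (PySem.List.pyGetD nums 0 0) nums) i 0)
        - min (PySem.List.pyGetD nums i 0)
          (PySem.List.pyGetD (smL nums nums.length (PySem.List.pyGetD nums (-1) 0)) i 0) ≤ k))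
        ∘ (fun (j : Nat) => (j : Int)))
      = (List.range nums.length).find?
        (stableP nums k (PySem.List.pyGetD nums 0 0) (PySem.List.pyGetD nums (-1) 0)) := by
    apply find?_congr_mem
    intro i hi
    have hin : i < nums.length := List.mem_range.mp hi
    have hPGi : (pgScan (PySem.List.pyGetD nums 0 0) nums).getD i 0
        = (nums.take (i+1)).foldl max (PySem.List.pyGetD nums 0 0) :=
      getD_pgScan nums _ i hin
    have hNSi : (smL nums nums.length (PySem.List.pyGetD nums (-1) 0)).getD i 0
        = (nums.drop i).foldl min (PySem.List.pyGetD nums (-1) 0) := by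
      rw [getD_smL nums nums.length _ i le_rfl hin]
      rw [List.take_of_length_le (le_refl nums.length)]
    have hmem1 : nums[i] ∈ nums.take (i+1) := by
      have h : (nums.take (i+1))[i]'(by simp [List.length_take]; omega) = nums[i] :=
        List.getElem_take
      rw [← h]; exact List.getElem_mem _
    have hmax : nums[i] ≤ (nums.take (i+1)).foldl max (PySem.List.pyGetD nums 0 0) :=
      (PySem.List.le_foldl_max _ _).2 _ hmem1
    have hmem2 : nums[i] ∈ nums.drop i := by
      rw [List.drop_eq_getElem_cons hin]; exact List.mem_cons_self
    have hmin : (nums.drop i).foldl min (PySem.List.pyGetD nums (-1) 0) ≤ nums[i] :=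
      (PySem.List.foldl_min_le _ _).2 _ hmem2
    simp only [Function.comp_apply, PySem.List.pyGetD_natCast, stableP]
    rw [show nums.getD i 0 = nums[i] from by
      simp [List.getD, List.getElem?_eq_getElem hin]]
    rw [hPGi, hNSi]
    congr 1
    rw [max_eq_right hmax, min_eq_right hmin]
  rw [hcong, ← List.range_eq_range']
  cases (List.range nums.length).find?
      (stableP nums k (PySem.List.pyGetD nums 0 0) (PySem.List.pyGetD nums (-1) 0)) with
  | none => simp [optR]
  | some i => simp [optR]

-- ===== VERDICT (by name: the statement is the Claim_ definition above) =====
theorem firstStableIndex_spec : Claim_equal_firstStableIndex := by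
  intro nums k _ hpre
  unfold Spec_firstStableIndex
  exact firstStableIndex_main nums k hpre
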